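-- pv_equiv track=rewrite | github.com/yashvantatk/task1_cs25b1070 | medium_5.py | get_valid_configurations
-- ===== SOURCE A (Python) =====
-- def get_valid_configurations(target, L1, L2, L3, D):
--    """
--    Generates all valid (Inner, Middle, Outer) tuples for a given target.
--    """
--    valid_states = []
--    # Try all possible lengths for the Inner segment
--    for inner in range(min(target, L1) + 1):
--        # Try all possible lengths for the Outer segment
--        for outer in range(min(target - inner, L3) + 1):
--            # The Middle segment makes up the rest of the target distance
--            middle = target - inner - outer
--
--
--            # Check if Middle is within limits AND the stability constraint is met
--            if 0 <= middle <= L2 and abs(inner - outer) <= D: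
--                valid_states.append((inner, middle, outer))
--
--
--    return valid_states
-- ===== SOURCE B (Python) =====
-- def get_valid_configurations(target, L1, L2, L3, D):
--     """
--     Generates all valid (Inner, Middle, Outer) tuples for a given target.
--     Enumerates the middle lengths directly: per inner, the valid middles form
--     one contiguous interval, scanned downward (matching ascending outer), and
--     the outer is derived; a single nested comprehension, no per-candidate test.
--     """
--     return [
--         (inner, middle, target - inner - middle)
--         for inner in range(min(target, L1) + 1)
--         for middle in range(min(L2, target - inner, target - 2 * inner + D),
--                             max(0, target - inner - L3, target - 2 * inner - D) - 1,
--                             -1)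
--     ]
-- ===== Notes on version B (the rewrite author's own statement) =====
-- stated objective: alternative
-- what changed: B enumerates the middle segment instead of the outer: per inner it computes the single contiguous interval of valid middles from the constraint bounds and emits it with a downward-counting nested comprehension, deriving outer arithmetically, instead of A's brute-force scan over every candidate outer with a per-candidate test (O(L1+output) vs O(L1*L3)).
import Mathlib
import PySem

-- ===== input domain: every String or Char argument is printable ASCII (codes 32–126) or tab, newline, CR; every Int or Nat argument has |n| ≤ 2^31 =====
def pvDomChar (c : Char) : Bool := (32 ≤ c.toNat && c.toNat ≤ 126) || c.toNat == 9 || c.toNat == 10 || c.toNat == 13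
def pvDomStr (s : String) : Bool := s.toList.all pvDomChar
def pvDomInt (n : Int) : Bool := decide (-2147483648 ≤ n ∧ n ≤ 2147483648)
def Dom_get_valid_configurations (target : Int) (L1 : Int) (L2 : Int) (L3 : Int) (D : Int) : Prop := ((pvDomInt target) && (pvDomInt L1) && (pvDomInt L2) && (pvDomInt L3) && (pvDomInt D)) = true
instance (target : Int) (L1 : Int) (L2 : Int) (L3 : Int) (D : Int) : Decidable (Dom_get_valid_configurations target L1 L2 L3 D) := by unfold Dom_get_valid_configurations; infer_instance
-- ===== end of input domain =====

-- B enumerates the MIDDLE segment instead of the outer: per inner it computes the one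
-- contiguous interval of valid middles and emits it downward, deriving the outer
-- arithmetically, instead of A's per-candidate-outer scan with a test (same return value).

-- ===== PORT A =====
def get_valid_configurations (target : Int) (L1 : Int) (L2 : Int) (L3 : Int) (D : Int) : List (Int × Int × Int) :=
  (PySem.List.pyRange 0 (min target L1 + 1) 1).foldl (fun acc inner =>
    (PySem.List.pyRange 0 (min (target - inner) L3 + 1) 1).foldl (fun acc2 outer =>
      let middle := target - inner - outer
      if 0 ≤ middle ∧ middle ≤ L2 ∧ |inner - outer| ≤ D then acc2 ++ [(inner, middle, outer)]
      else acc2) acc) []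

-- ===== PORT B =====
def get_valid_configurations_alt (target : Int) (L1 : Int) (L2 : Int) (L3 : Int) (D : Int) : List (Int × Int × Int) :=
  (PySem.List.pyRange 0 (min target L1 + 1) 1).flatMap (fun inner =>
    (PySem.List.pyRange (min (min L2 (target - inner)) (target - 2 * inner + D))
                        (max (max 0 (target - inner - L3)) (target - 2 * inner - D) - 1)
                        (-1)).map
      (fun middle => (inner, middle, target - inner - middle)))

-- ===== PRECONDITION & SPEC =====
def Spec_get_valid_configurations (target : Int) (L1 : Int) (L2 : Int) (L3 : Int) (D : Int) (out : List (Int × Int × Int)) : Prop := out = get_valid_configurations_alt target L1 L2 L3 D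
instance (target : Int) (L1 : Int) (L2 : Int) (L3 : Int) (D : Int) (out : List (Int × Int × Int)) : Decidable (Spec_get_valid_configurations target L1 L2 L3 D out) := by unfold Spec_get_valid_configurations; infer_instance

-- ===== CLAIM (what is proved, stated in full; the proofs are below) =====
def Claim_equal_get_valid_configurations : Prop := ∀ (target : Int) (L1 : Int) (L2 : Int) (L3 : Int) (D : Int), Dom_get_valid_configurations target L1 L2 L3 D → Spec_get_valid_configurations target L1 L2 L3 D (get_valid_configurations target L1 L2 L3 D)

-- ===== LEMMAS AND PROOFS =====

-- Filtering an integer range by an interval predicate gives the intersected range.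
theorem filter_pyRange_interval (lo hi : Int) (p : Int → Prop) [DecidablePred p]
    (hp : ∀ x, p x ↔ lo ≤ x ∧ x < hi) :
    ∀ (a b : Int), (PySem.List.pyRange a b 1).filter (fun x => decide (p x))
      = PySem.List.pyRange (max a lo) (min b hi) 1 := by
  intro a b
  by_cases hab : b ≤ a
  · rw [PySem.List.pyRange_one_eq_nil hab, PySem.List.pyRange_one_eq_nil (by omega)]
    rfl
  · push Not at hab
    rw [PySem.List.pyRange_one_cons hab]
    by_cases hpa : p a
    · have ⟨h1, h2⟩ := (hp a).mp hpa
      rw [List.filter_cons_of_pos (by simpa using hpa),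
          filter_pyRange_interval lo hi p hp (a+1) b]
      have e1 : max a lo = a := by omega
      have e2 : max (a+1) lo = a + 1 := by omega
      have e3 : a < min b hi := by omega
      rw [e1, e2, PySem.List.pyRange_one_cons e3]
    · have h3 : ¬ (lo ≤ a ∧ a < hi) := fun h => hpa ((hp a).mpr h)
      rw [List.filter_cons_of_neg (by simpa using hpa),
          filter_pyRange_interval lo hi p hp (a+1) b]
      by_cases hlo : a < lo
      · rw [show max (a+1) lo = max a lo by omega]
      · have hhi : hi ≤ a := by omega
        rw [PySem.List.pyRange_one_eq_nil (by omega),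
            PySem.List.pyRange_one_eq_nil (by omega)]
termination_by a b => (b - a).toNat
decreasing_by all_goals omega

theorem foldl_congr_fn {α β : Type} (f g : α → β → α) (h : ∀ acc x, f acc x = g acc x) :
    ∀ (l : List β) (init : α), l.foldl f init = l.foldl g init := by
  intro l
  induction l with
  | nil => intro init; rfl
  | cons x xs ih => intro init; simp only [List.foldl_cons, h, ih]

-- Mapping over a countdown range is mapping the reflected function over the ascending range.
theorem map_pyRange_neg_one_reflect {β : Type} (s a b : Int) (g : Int → β) :
    (PySem.List.pyRange (s - a) (s - b) (-1)).map g
      = (PySem.List.pyRange a b 1).map (fun o => g (s - o)) := by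
  rw [PySem.List.pyRange_neg_one, PySem.List.pyRange_one, List.map_map, List.map_map]
  rw [show (s - a - (s - b)).toNat = (b - a).toNat by omega]
  apply List.map_congr_left
  intro k _
  simp only [Function.comp]
  congr 1
  omega

-- Per inner, A's tested scan over outers equals B's direct middle-interval emission.
theorem inner_step_eq (target L2 L3 D inner : Int) (acc : List (Int × Int × Int)) :
    (PySem.List.pyRange 0 (min (target - inner) L3 + 1) 1).foldl (fun acc2 outer =>
        let middle := target - inner - outer
        if 0 ≤ middle ∧ middle ≤ L2 ∧ |inner - outer| ≤ D then acc2 ++ [(inner, middle, outer)]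
        else acc2) acc
    = acc ++ (PySem.List.pyRange (min (min L2 (target - inner)) (target - 2 * inner + D))
                        (max (max 0 (target - inner - L3)) (target - 2 * inner - D) - 1)
                        (-1)).map
        (fun middle => (inner, middle, target - inner - middle)) := by
  rw [PySem.List.foldl_append_ite
        (fun outer => 0 ≤ target - inner - outer ∧ target - inner - outer ≤ L2 ∧ |inner - outer| ≤ D)
        (fun outer => (inner, target - inner - outer, outer))]
  rw [filter_pyRange_interval (max (inner - D) (target - inner - L2)) (min (target - inner) (inner + D) + 1)
        _ (fun x => by constructor <;> · intro h; rw [abs_le] at *; omega)]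
  rw [show min (min L2 (target - inner)) (target - 2 * inner + D)
        = target - inner - max 0 (max (inner - D) (target - inner - L2)) by omega,
      show max (max 0 (target - inner - L3)) (target - 2 * inner - D) - 1
        = target - inner - min (min (target - inner) L3 + 1) (min (target - inner) (inner + D) + 1) by omega,
      map_pyRange_neg_one_reflect]
  congr 1
  apply List.map_congr_left
  intro o _
  show (inner, target - inner - o, o) = (inner, target - inner - o, target - inner - (target - inner - o))
  have h3 : target - inner - (target - inner - o) = o := by omega
  rw [h3]

-- ===== VERDICT (by name: the statement is the Claim_ definition above) =====
theorem get_valid_configurations_spec : Claim_equal_get_valid_configurations := by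
  intro target L1 L2 L3 D _
  unfold Spec_get_valid_configurations get_valid_configurations get_valid_configurations_alt
  rw [foldl_congr_fn _ _ (fun acc inner => inner_step_eq target L2 L3 D inner acc),
      PySem.List.foldl_append_eq_flatMap]
  rfl
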